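-- pv_equiv track=rewrite | github.com/remyCases/adventOfCode | 2025/src/py/day_three.py | computeJoltageFromTwoBanks
-- ===== SOURCE A (Python) =====
-- from typing import List
--
-- def computeJoltageFromTwoBanks(batteries: List[int]) -> int:
--     joltage: List[int] = [0, 0]
--     indeces: List[int] = [0, 0]
--
--     for i in range(indeces[0], (len(batteries)-1)):
--         if batteries[i] > joltage[0]:
--             joltage[0] = batteries[i]
--             indeces[1] = i+1
--
--     for i in range(indeces[1], len(batteries)):
--         if batteries[i] > joltage[1]:
--             joltage[1] = batteries[i]
--
--     return joltage[0] * 10 + joltage[1]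
-- ===== SOURCE B (Python) =====
-- from typing import List
--
-- def computeJoltageFromTwoBanks(batteries: List[int]) -> int:
--     # single right-to-left pass over the prefix, carrying the floored suffix max
--     if not batteries:
--         return 0
--     last = batteries[-1]
--     suf = last if last > 0 else 0
--     best1, best2 = 0, suf
--     for x in reversed(batteries[:-1]):
--         if x > 0 and x >= best1:
--             best1, best2 = x, suf
--         if x > suf:
--             suf = x
--     return best1 * 10 + best2
-- ===== Notes on version B (the rewrite author's own statement) =====
-- stated objective: alternative
-- what changed: A makes two left-to-right index loops (prefix max with a recorded split index, then a second scan from that index); B is a single right-to-left pass over the prefix carrying a floored suffix-max accumulator, updating the (best1,best2) pair in place, so no split index and no second scan exist.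
import Mathlib
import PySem

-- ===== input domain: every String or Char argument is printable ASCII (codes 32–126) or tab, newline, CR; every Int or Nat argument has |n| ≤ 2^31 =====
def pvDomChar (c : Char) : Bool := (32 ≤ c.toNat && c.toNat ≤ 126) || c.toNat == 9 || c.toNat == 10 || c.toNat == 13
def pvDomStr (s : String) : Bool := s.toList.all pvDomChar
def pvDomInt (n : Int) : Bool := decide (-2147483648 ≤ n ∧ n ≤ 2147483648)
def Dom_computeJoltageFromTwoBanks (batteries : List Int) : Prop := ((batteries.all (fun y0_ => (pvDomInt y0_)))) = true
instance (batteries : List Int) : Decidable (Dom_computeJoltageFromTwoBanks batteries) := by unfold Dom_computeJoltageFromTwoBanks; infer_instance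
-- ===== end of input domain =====

-- B replaces A's two left-to-right index loops by one right-to-left pass over the prefix carrying a floored suffix-max accumulator and updating the (best1,best2) pair in place (objective: alternative).


-- ===== PORT A =====
-- joltage = [0,0] / indeces = [0,0] are carried as the scalars they hold: the first loop's
-- state is (joltage[0], indeces[1]) (joltage[1] and indeces[0] never change in it); every
-- batteries[i] has 0 ≤ i < len(batteries), so pyGetD with any default is exact there.
def computeJoltageFromTwoBanks (batteries : List Int) : Int :=
  let s := (PySem.List.pyRange 0 ((batteries.length : Int) - 1) 1).foldl
    (fun (st : Int × Int) i =>
      if PySem.List.pyGetD batteries i 0 > st.1 then (PySem.List.pyGetD batteries i 0, i + 1) else st)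
    (0, 0)
  let j1 := (PySem.List.pyRange s.2 (batteries.length : Int) 1).foldl
    (fun acc i => if PySem.List.pyGetD batteries i 0 > acc then PySem.List.pyGetD batteries i 0 else acc)
    0
  s.1 * 10 + j1

-- ===== PORT B =====
-- Source B's loop 'for x in reversed(batteries[:-1])' is the foldl over (batteries[:-1]).reverse
-- with state (suf, best1, best2); batteries[-1] on a nonempty list is pyGetD _ (-1) _ (exact).
def computeJoltageFromTwoBanks_alt (batteries : List Int) : Int :=
  match batteries with
  | [] => 0
  | b :: bs =>
    let last := PySem.List.pyGetD (b :: bs) (-1) 0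
    let suf0 := if last > 0 then last else 0
    let st := ((PySem.List.slice (b :: bs) none (some (-1))).reverse).foldl
      (fun (st : Int × Int × Int) x =>
        (if x > st.1 then x else st.1, if x > 0 ∧ x ≥ st.2.1 then (x, st.1) else st.2))
      (suf0, 0, suf0)
    st.2.1 * 10 + st.2.2

-- ===== PRECONDITION & SPEC =====
def Spec_computeJoltageFromTwoBanks (batteries : List Int) (out : Int) : Prop := out = computeJoltageFromTwoBanks_alt batteries
instance (batteries : List Int) (out : Int) : Decidable (Spec_computeJoltageFromTwoBanks batteries out) := by unfold Spec_computeJoltageFromTwoBanks; infer_instance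

-- ===== CLAIM (what is proved, stated in full; the proofs are below) =====
def Claim_equal_computeJoltageFromTwoBanks : Prop := ∀ (batteries : List Int), Dom_computeJoltageFromTwoBanks batteries → Spec_computeJoltageFromTwoBanks batteries (computeJoltageFromTwoBanks batteries)

-- ===== LEMMAS AND PROOFS =====

-- A's comparison step is a running max.
lemma step_is_max (acc x : Int) : (if x > acc then x else acc) = max acc x := by
  rcases le_or_gt x acc with h | h
  · simp [not_lt.mpr h, max_eq_left h]
  · simp [h, max_eq_right h.le]

-- pulling one element out of a running max
lemma foldl_max_swap (l : List Int) (a b : Int) :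
    l.foldl max (max a b) = max b (l.foldl max a) := by
  induction l generalizing a with
  | nil => simp [max_comm]
  | cons y t ih =>
    simp only [List.foldl_cons]
    rw [max_right_comm, ih]

-- A's first loop, read over the enumerated prefix, computes the 0-floored max together with
-- the split point: first index of that max plus one when the max is positive, else 0.
lemma loop1_spec (l : List Int) :
    (PySem.List.enumerate l 0).foldl
      (fun (st : Int × Int) p => if p.2 > st.1 then (p.2, p.1 + 1) else st) (0, 0)
    = (l.foldl max 0,
       if l.foldl max 0 > 0 then ((PySem.List.index? l (l.foldl max 0)).getD 0 : Int) + 1 else 0) := by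
  induction l using List.reverseRecOn with
  | nil => simp [PySem.List.enumerate]
  | append_singleton l x ih =>
    have hM0 : (0 : Int) ≤ l.foldl max 0 := (PySem.List.le_foldl_max l 0).1
    rw [PySem.List.enumerate_append, List.foldl_append, ih, List.foldl_append]
    simp only [PySem.List.enumerate_cons, PySem.List.enumerate_nil, List.foldl_cons, List.foldl_nil]
    rcases le_or_gt x (l.foldl max 0) with hx | hx
    · rw [if_neg (not_lt.mpr hx), max_eq_left hx]
      by_cases hM : (0 : Int) < l.foldl max 0
      · have hmem : l.foldl max 0 ∈ l := by
          rcases PySem.List.foldl_max_mem l 0 with h | h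
          · omega
          · exact h
        rw [PySem.List.index?_append_of_mem [x] hmem]
      · simp [hM]
    · rw [if_pos hx, max_eq_right hx.le, if_pos (lt_of_le_of_lt hM0 hx)]
      have hnot : x ∉ l := fun hm =>
        absurd ((PySem.List.le_foldl_max l 0).2 x hm) (not_le.mpr hx)
      rw [PySem.List.index?_append_singleton_self l x hnot]
      simp

-- B's right-to-left pass computes the same three quantities: the running suffix max,
-- the 0-floored prefix max, and the floored max after the first occurrence of that max.
lemma bfold_spec (suf0 : Int) (p : List Int) :
    p.reverse.foldl
      (fun (st : Int × Int × Int) x =>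
        (if x > st.1 then x else st.1, if x > 0 ∧ x ≥ st.2.1 then (x, st.1) else st.2))
      (suf0, 0, suf0)
    = (p.foldl max suf0, p.foldl max 0,
       if p.foldl max 0 > 0 then
         (p.drop (((PySem.List.index? p (p.foldl max 0)).getD 0) + 1)).foldl max suf0
       else suf0) := by
  induction p with
  | nil => simp
  | cons x t ih =>
    have hM0 : (0 : Int) ≤ t.foldl max 0 := (PySem.List.le_foldl_max t 0).1
    rw [List.reverse_cons, List.foldl_append, ih]
    simp only [List.foldl_cons, List.foldl_nil]
    rw [foldl_max_swap t 0 x, foldl_max_swap t suf0 x]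
    by_cases h : x > 0 ∧ x ≥ t.foldl max 0
    · rw [if_pos h, max_eq_left h.2, step_is_max, max_comm (t.foldl max suf0) x,
        if_pos h.1, PySem.List.index?_cons_self]
      simp
    · rw [if_neg h, step_is_max, max_comm (t.foldl max suf0) x]
      by_cases hxm : x < t.foldl max 0
      · rw [max_eq_right hxm.le]
        by_cases hM : (0:Int) < t.foldl max 0
        · have hmem : t.foldl max 0 ∈ t := by
            rcases PySem.List.foldl_max_mem t 0 with hh | hh
            · omega
            · exact hh
          rcases Option.isSome_iff_exists.mp ((PySem.List.index?_isSome_iff t _).mpr hmem) with ⟨k, hk⟩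
          rw [if_pos hM, if_pos hM, PySem.List.index?_cons_of_ne t (show x ≠ t.foldl max 0 by omega), hk]
          simp
        · rw [if_neg hM, if_neg hM]
      · have hx0 : x = 0 ∧ t.foldl max 0 = 0 := by
          rcases not_and_or.mp h with h1 | h1 <;> omega
        rw [hx0.1, hx0.2]
        simp

-- The two ports agree on every non-empty input.
lemma ports_agree_cons (b : Int) (bs : List Int) :
    computeJoltageFromTwoBanks (b :: bs) = computeJoltageFromTwoBanks_alt (b :: bs) := by
  have hne' : (b :: bs) ≠ [] := by simp
  simp only [computeJoltageFromTwoBanks, computeJoltageFromTwoBanks_alt]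
  rw [PySem.List.slice_to_neg_one, PySem.List.pyGetD_neg_one _ _ hne']
  set xs := b :: bs with hxs
  set p := xs.dropLast with hp
  have hne : xs ≠ [] := hne'
  have hxlen : xs.length = bs.length + 1 := by simp [hxs]
  have hplen : p.length = bs.length := by simp [hp, hxs]
  have hlen : (xs.length : Int) - 1 = (p.length : Int) := by
    rw [hxlen, hplen]; push_cast; ring
  have hxsplit : p ++ [xs.getLast hne] = xs := List.dropLast_concat_getLast hne
  rw [hlen]
  -- inside the first range, batteries[i] is prefix[i]
  have hget : ∀ (st : Int × Int), ∀ i ∈ PySem.List.pyRange 0 ((p.length : Int)) 1,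
      (fun (st : Int × Int) i =>
        if PySem.List.pyGetD xs i 0 > st.1 then (PySem.List.pyGetD xs i 0, i + 1) else st) st i
      = (fun (st : Int × Int) i =>
        if PySem.List.pyGetD p i 0 > st.1 then (PySem.List.pyGetD p i 0, i + 1) else st) st i := by
    intro st i hi
    have hb := (PySem.List.mem_pyRange_one).1 hi
    have h0 : (0 : Int) ≤ i := hb.1
    have hlt : i.toNat < p.length := by omega
    have hlt' : i.toNat < xs.length := by omega
    have hgd : PySem.List.pyGetD xs i 0 = PySem.List.pyGetD p i 0 := by
      rw [PySem.List.pyGetD_of_nonneg xs 0 h0, PySem.List.pyGetD_of_nonneg p 0 h0,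
        List.getD_eq_getElem _ _ hlt', List.getD_eq_getElem _ _ hlt]
      simp [hp, List.getElem_dropLast]
    simp only [hgd]
  rw [PySem.List.foldl_congr_mem _ _ _ _ hget]
  -- the indexed loop is the fold over the enumerated prefix
  have hfold1 : (PySem.List.pyRange 0 ((p.length : Int)) 1).foldl
      (fun (st : Int × Int) i =>
        if PySem.List.pyGetD p i 0 > st.1 then (PySem.List.pyGetD p i 0, i + 1) else st) (0, 0)
    = (PySem.List.enumerate p 0).foldl
        (fun (st : Int × Int) q => if q.2 > st.1 then (q.2, q.1 + 1) else st) (0, 0) := by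
    rw [PySem.List.enumerate_eq_map_pyRange p (0 : Int), List.foldl_map]
    simp [PySem.List.len]
  rw [hfold1, loop1_spec, bfold_spec]
  set last := xs.getLast hne with hlast
  set suf0 : Int := if last > 0 then last else 0 with hsuf0
  have hsuf0' : suf0 = max 0 last := by rw [hsuf0, step_is_max]
  set M := p.foldl max 0 with hM
  have hM0 : (0 : Int) ≤ M := (PySem.List.le_foldl_max p 0).1
  set split : Int := if M > 0 then ((PySem.List.index? p M).getD 0 : Int) + 1 else 0 with hsplit
  have hs0 : (0 : Int) ≤ split := by
    rw [hsplit]; split_ifs <;> positivity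
  -- A's second loop is the running max over the suffix batteries[split:]
  have h2 : (PySem.List.pyRange split (xs.length : Int) 1).foldl
      (fun acc i => if PySem.List.pyGetD xs i 0 > acc then PySem.List.pyGetD xs i 0 else acc) 0
    = (xs.drop split.toNat).foldl max 0 := by
    have h := PySem.List.foldl_pyRange_pyGetD xs 0
      (fun acc x => if x > acc then x else acc) 0 hs0
    simp only [PySem.List.len] at h
    rw [h]
    exact PySem.List.foldl_congr_mem _ _ _ _ (fun acc x _ => step_is_max acc x)
  rw [h2]
  simp only
  congr 1
  -- it remains to equate the two suffix maxima
  by_cases hMpos : M > 0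
  · rw [if_pos hMpos]
    have hmem : M ∈ p := by
      rcases PySem.List.foldl_max_mem p 0 with hh | hh
      · omega
      · exact hh
    rcases Option.isSome_iff_exists.mp ((PySem.List.index?_isSome_iff p _).mpr hmem) with ⟨k, hk⟩
    rcases PySem.List.getElem_of_index?_eq_some hk with ⟨hklt, _, _⟩
    have hsplitv : split.toNat = k + 1 := by
      rw [hsplit, if_pos hMpos, hk]; simp
    rw [hsplitv, ← hxsplit,
      List.drop_append_of_le_length (by omega), List.foldl_append]
    simp only [List.foldl_cons, List.foldl_nil, hk, Option.getD_some]
    rw [hsuf0', foldl_max_swap, max_comm]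
  · rw [if_neg hMpos]
    have hsplitv : split.toNat = 0 := by rw [hsplit, if_neg hMpos]; simp
    rw [hsplitv, List.drop_zero, ← hxsplit, List.foldl_append]
    simp only [List.foldl_cons, List.foldl_nil]
    have : M = 0 := by omega
    rw [← hM, this, hsuf0', max_comm]

-- ===== VERDICT (by name: the statement is the Claim_ definition above) =====
theorem computeJoltageFromTwoBanks_spec : Claim_equal_computeJoltageFromTwoBanks := by
  intro batteries _
  unfold Spec_computeJoltageFromTwoBanks
  rcases batteries with _ | ⟨b, bs⟩
  · decide
  · exact ports_agree_cons b bs
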